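-- pv_equiv track=rewrite | github.com/Choi-SeoYun/CodingTest | programmers/모의고사.py | solution
-- ===== SOURCE A (Python) =====
-- def solution(answers):
--     answer = []
--     student_1 = [1,2,3,4,5]
--     student_2 = [2, 1, 2, 3, 2, 4, 2, 5]
--     student_3 = [3, 3, 1, 1, 2, 2, 4, 4, 5, 5]
--
--     score_1, score_2, score_3 = 0, 0, 0
--
--     for index, i in enumerate(answers):
--         if i == student_1[index%5]:
--             score_1 += 1
--         if i == student_2[index%8]:
--             score_2 += 1
--         if i == student_3[index%10]:
--             score_3 += 1
--
--     scores = [score_1, score_2, score_3]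
--
--     for index, score in enumerate(scores):
--         if score == max(scores):
--             answer.append(index+1)
--
--
--     return answer
-- ===== SOURCE B (Python) =====
-- def solution(answers):
--     # Histogram algorithm: bucket answers by (position mod 40, value) once (40 = lcm(5,8,10)),
--     # then each score is 40 dictionary lookups -- no per-element pattern comparison.
--     hist = {}
--     for i, a in enumerate(answers):
--         k = (i % 40, a)
--         hist[k] = hist.get(k, 0) + 1
--     patterns = [[1, 2, 3, 4, 5],
--                 [2, 1, 2, 3, 2, 4, 2, 5],
--                 [3, 3, 1, 1, 2, 2, 4, 4, 5, 5]]
--     scores = [sum(hist.get((r, p[r % len(p)]), 0) for r in range(40)) for p in patterns]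
--     best = max(scores)
--     return [i + 1 for i, s in enumerate(scores) if s == best]
-- ===== Notes on version B (the rewrite author's own statement) =====
-- stated objective: alternative
-- what changed: Replaces the per-element pattern comparisons with a histogram: answers are bucketed once into a dict keyed by (index mod 40, value) (40 = lcm of the pattern lengths), and each student's score is then obtained by 40 dictionary lookups against the tiled pattern, with no comparison of answers to patterns during the scan.
import Mathlib
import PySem

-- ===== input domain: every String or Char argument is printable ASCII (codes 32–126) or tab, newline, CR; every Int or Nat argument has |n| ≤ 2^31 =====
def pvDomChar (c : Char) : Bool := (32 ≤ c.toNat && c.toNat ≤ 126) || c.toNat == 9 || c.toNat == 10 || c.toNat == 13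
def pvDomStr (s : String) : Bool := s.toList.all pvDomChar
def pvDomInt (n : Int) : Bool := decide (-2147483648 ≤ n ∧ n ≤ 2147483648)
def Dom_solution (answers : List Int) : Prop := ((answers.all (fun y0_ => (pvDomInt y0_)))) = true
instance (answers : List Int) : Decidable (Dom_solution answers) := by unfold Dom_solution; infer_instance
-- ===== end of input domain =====

-- B buckets answers once into a histogram keyed by (index mod 40, value) and reads each
-- score back with 40 dict lookups, instead of comparing each answer to the three patterns.

-- ===== PORT A =====
-- the combined for-loop of A: one pass, three score accumulators, Nat counter = enumerate index
def solutionLoop (l : List Int) (n : Nat) (s1 s2 s3 : Int) : Int × Int × Int :=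
  match l with
  | [] => (s1, s2, s3)
  | a :: rest =>
    solutionLoop rest (n + 1)
      (if a = (([1,2,3,4,5] : List Int).getD (n % 5) 0) then s1 + 1 else s1)
      (if a = (([2,1,2,3,2,4,2,5] : List Int).getD (n % 8) 0) then s2 + 1 else s2)
      (if a = (([3,3,1,1,2,2,4,4,5,5] : List Int).getD (n % 10) 0) then s3 + 1 else s3)

def solution (answers : List Int) : List Int :=
  let t := solutionLoop answers 0 0 0 0
  let scores : List Int := [t.1, t.2.1, t.2.2]
  -- second loop: append index+1 whenever score == max(scores); scores has length 3 so max? is some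
  (PySem.List.enumerate scores 0).foldl
    (fun acc q => if q.2 = (PySem.List.max? scores (fun y => y)).getD 0 then acc ++ [q.1 + 1] else acc) []

-- ===== PORT B =====
-- hist[k] = hist.get(k, 0) + 1 over enumerate(answers), k = (i % 40, a)
def histB (answers : List Int) : PySem.Dict (Int × Int) Int :=
  (PySem.List.enumerate answers 0).foldl
    (fun h q => h.insert (PySem.Int.mod q.1 40, q.2) (h.getD (PySem.Int.mod q.1 40, q.2) 0 + 1))
    PySem.Dict.empty

-- sum(hist.get((r, p[r % len(p)]), 0) for r in range(40))
def scoreB (h : PySem.Dict (Int × Int) Int) (p : List Int) : Int :=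
  (PySem.List.pyRange 0 40 1).foldl
    (fun s r => s + h.getD (r, PySem.List.pyGetD p (PySem.Int.mod r (p.length : Int)) 0) 0) 0

def solution_alt (answers : List Int) : List Int :=
  let h := histB answers
  let patterns : List (List Int) := [[1,2,3,4,5], [2,1,2,3,2,4,2,5], [3,3,1,1,2,2,4,4,5,5]]
  let scores := patterns.map (fun p => scoreB h p)
  let best := (PySem.List.max? scores (fun y => y)).getD 0
  (PySem.List.enumerate scores 0).foldl
    (fun acc q => if q.2 = best then acc ++ [q.1 + 1] else acc) []

-- ===== PRECONDITION & SPEC =====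
def Spec_solution (answers : List Int) (out : List Int) : Prop := out = solution_alt answers
instance (answers : List Int) (out : List Int) : Decidable (Spec_solution answers out) := by unfold Spec_solution; infer_instance

-- ===== CLAIM =====
def Claim_equal_solution : Prop := ∀ (answers : List Int), Dom_solution answers → Spec_solution answers (solution answers)

-- ===== LEMMAS AND PROOFS =====

/-- count of matches of pattern `p` against `l`, positions starting at `n` (A's per-element test) -/
def cnt (p : List Int) : List Int → Nat → Int
  | [], _ => 0
  | a :: t, n => (if a = p.getD (n % p.length) 0 then 1 else 0) + cnt p t (n + 1)

/-- B's lookup key value for residue r (as the port computes it) -/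
def keyB (p : List Int) (r : Int) : Int :=
  PySem.List.pyGetD p (PySem.Int.mod r (p.length : Int)) 0

/-- the residues 0..39 as Ints -/
def rs40 : List Int := (List.range 40).map (fun i => (i : Int))

/-- sum of dict lookups over a residue list, exactly B's inner fold shape -/
def sumS (rs : List Int) (p : List Int) (d : PySem.Dict (Int × Int) Int) : Int :=
  rs.foldl (fun s r => s + d.getD (r, keyB p r) 0) 0

theorem foldl_add_acc (g : Int → Int) (rs : List Int) :
    ∀ a : Int, rs.foldl (fun s r => s + g r) a = a + rs.foldl (fun s r => s + g r) 0 := by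
  induction rs with
  | nil => intro a; simp
  | cons r t ih => intro a; simp only [List.foldl_cons]; rw [ih (a + g r), ih (0 + g r)]; ring

theorem sumS_cons (r : Int) (rs p : List Int) (d : PySem.Dict (Int × Int) Int) :
    sumS (r :: rs) p d = d.getD (r, keyB p r) 0 + sumS rs p d := by
  unfold sumS
  simp only [List.foldl_cons]
  rw [foldl_add_acc]
  ring

theorem sumS_insert (rs p : List Int) (hnd : rs.Nodup) (d : PySem.Dict (Int × Int) Int)
    (k : Int × Int) (v : Int) :
    sumS rs p (d.insert k v) =
      sumS rs p d + (if k.1 ∈ rs ∧ k.2 = keyB p k.1 then v - d.getD k 0 else 0) := by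
  induction rs with
  | nil => simp [sumS]
  | cons r t ih =>
    have hnd' : t.Nodup := hnd.of_cons
    rw [sumS_cons, sumS_cons, ih hnd']
    by_cases hk : k = (r, keyB p r)
    · subst hk
      rw [PySem.Dict.getD_insert_self]
      have hr : (r, keyB p r).1 ∉ t := by
        simpa using (List.nodup_cons.mp hnd).1
      simp only [List.mem_cons]
      rw [if_neg (by simp [hr]), if_pos (by simp)]
      ring
    · rw [PySem.Dict.getD_insert, if_neg (fun h => hk h.symm)]
      have : (k.1 ∈ r :: t ∧ k.2 = keyB p k.1) ↔ (k.1 ∈ t ∧ k.2 = keyB p k.1) := by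
        constructor
        · rintro ⟨h1, h2⟩
          rcases List.mem_cons.mp h1 with h | h
          · exact absurd (by obtain ⟨k1, k2⟩ := k; simp_all) hk
          · exact ⟨h, h2⟩
        · exact fun ⟨h1, h2⟩ => ⟨List.mem_cons_of_mem _ h1, h2⟩
      rw [if_congr this rfl rfl]
      ring

theorem rs40_nodup : rs40.Nodup := by decide

theorem mem_rs40 (m : Nat) (h : m < 40) : ((m : Int) ∈ rs40) := by
  simp [rs40]
  omega

/-- B's count, phrased with residues mod 40 -/
def cnt40 (p : List Int) : List Int → Nat → Int
  | [], _ => 0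
  | a :: t, n => (if a = keyB p ((n % 40 : Nat) : Int) then 1 else 0) + cnt40 p t (n + 1)

theorem hist_inv (p : List Int) (l : List Int) : ∀ (n : Nat) (d : PySem.Dict (Int × Int) Int),
    sumS rs40 p ((PySem.List.enumerate l (n : Int)).foldl
      (fun h q => h.insert (PySem.Int.mod q.1 40, q.2) (h.getD (PySem.Int.mod q.1 40, q.2) 0 + 1)) d)
    = sumS rs40 p d + cnt40 p l n := by
  induction l with
  | nil => intro n d; simp [PySem.List.enumerate_nil, cnt40]
  | cons a t ih =>
    intro n d
    rw [PySem.List.enumerate_cons]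
    simp only [List.foldl_cons]
    have hcast : ((n : Int) + 1) = ((n + 1 : Nat) : Int) := by push_cast; ring
    rw [hcast, ih]
    have hmod : PySem.Int.mod (n : Int) 40 = ((n % 40 : Nat) : Int) := by
      rw [show (40 : Int) = ((40 : Nat) : Int) from rfl, PySem.Int.mod_natCast]
    rw [hmod]
    rw [sumS_insert rs40 p rs40_nodup]
    have hmem : ((n % 40 : Nat) : Int) ∈ rs40 := mem_rs40 _ (Nat.mod_lt _ (by norm_num))
    simp only [cnt40]
    by_cases ha : a = keyB p ((n % 40 : Nat) : Int)
    · rw [if_pos ⟨hmem, ha⟩, if_pos ha]; ring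
    · rw [if_neg (by rintro ⟨_, h⟩; exact ha h), if_neg ha]; ring

theorem keyB_natCast (p : List Int) (m : Nat) :
    keyB p ((m : Int)) = p.getD (m % p.length) 0 := by
  unfold keyB
  rw [show ((p.length : Nat) : Int) = ((p.length : Nat) : Int) from rfl, PySem.Int.mod_natCast,
    PySem.List.pyGetD_natCast]

theorem sumS_empty (rs p : List Int) : sumS rs p PySem.Dict.empty = 0 := by
  induction rs with
  | nil => rfl
  | cons r t ih => rw [sumS_cons, ih, PySem.Dict.getD_empty]; ring

theorem cnt40_eq_cnt (p : List Int) (hdvd : p.length ∣ 40) (l : List Int) :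
    ∀ n : Nat, cnt40 p l n = cnt p l n := by
  induction l with
  | nil => intro n; rfl
  | cons a t ih =>
    intro n
    simp only [cnt40, cnt, ih]
    rw [keyB_natCast p, Nat.mod_mod_of_dvd n hdvd]

theorem scoreB_eq (answers p : List Int) (hdvd : p.length ∣ 40) :
    scoreB (histB answers) p = cnt p answers 0 := by
  have hr : PySem.List.pyRange 0 40 1 = rs40 := by decide
  have hs : scoreB (histB answers) p = sumS rs40 p (histB answers) := by
    unfold scoreB sumS keyB
    rw [hr]
  have h0 := hist_inv p answers 0 PySem.Dict.empty
  push_cast at h0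
  rw [hs]
  unfold histB
  rw [h0, sumS_empty, cnt40_eq_cnt p hdvd]
  ring

theorem loop_eq (l : List Int) : ∀ (n : Nat) (s1 s2 s3 : Int),
    solutionLoop l n s1 s2 s3 =
      (s1 + cnt [1,2,3,4,5] l n, s2 + cnt [2,1,2,3,2,4,2,5] l n, s3 + cnt [3,3,1,1,2,2,4,4,5,5] l n) := by
  induction l with
  | nil => intro n s1 s2 s3; simp [solutionLoop, cnt]
  | cons a t ih =>
    intro n s1 s2 s3
    rw [solutionLoop, ih]
    simp only [cnt, List.length_cons, List.length_nil]
    norm_num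
    constructor
    · split_ifs <;> ring
    constructor
    · split_ifs <;> ring
    · split_ifs <;> ring

-- ===== VERDICT =====
theorem solution_spec : Claim_equal_solution := by
  intro answers _
  unfold Spec_solution solution solution_alt
  have h := loop_eq answers 0 0 0 0
  simp only [h, List.map_cons, List.map_nil, zero_add,
    scoreB_eq answers [1,2,3,4,5] (by decide),
    scoreB_eq answers [2,1,2,3,2,4,2,5] (by decide),
    scoreB_eq answers [3,3,1,1,2,2,4,4,5,5] (by decide)]
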